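-- pv_equiv track=rewrite | github.com/brucewayne1212/withdean-football-fixtures | text_fixture_parser.py | _extract_full_team_name
-- ===== SOURCE A (Python) =====
-- from typing import Dict, Optional, List
--
-- def _extract_full_team_name(text: str, team_keyword: str) -> Optional[str]:
--     """Extract the full team name around a keyword"""
--     # Find the position of the keyword
--     keyword_pos = text.lower().find(team_keyword)
--     if keyword_pos == -1:
--         return None
--
--     # Expand around the keyword to get the full team name
--     start = keyword_pos
--     end = keyword_pos + len(team_keyword)
--
--     # Expand backwards
--     while start > 0 and text[start - 1].isalnum():
--         start -= 1
--
--     # Expand forwards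
--     while end < len(text) and (text[end].isalnum() or text[end] in ' -'):
--         end += 1
--
--     full_name = text[start:end].strip()
--     return full_name if full_name else None
-- ===== SOURCE B (Python) =====
-- from typing import Optional
--
-- def _take_while(pred, chars):
--     out = []
--     for c in chars:
--         if not pred(c):
--             break
--         out.append(c)
--     return out
--
-- def _extract_full_team_name(text: str, team_keyword: str) -> Optional[str]:
--     """Extract the full team name around a keyword (piece-wise construction)."""
--     pos = text.lower().find(team_keyword)
--     if pos == -1:
--         return None
--     end = pos + len(team_keyword)
--     back = _take_while(str.isalnum, reversed(text[:pos]))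
--     fwd = _take_while(lambda c: c.isalnum() or c in ' -', text[end:])
--     full = (''.join(reversed(back)) + text[pos:end] + ''.join(fwd)).strip()
--     return full if full else None
-- ===== Notes on version B (the rewrite author's own statement) =====
-- stated objective: alternative
-- what changed: A moves two integer indices with while-loops and then slices once; B instead builds the result piecewise, concatenating a takeWhile over the reversed prefix, the keyword slice itself, and a takeWhile over the suffix, with no index arithmetic.
import Mathlib
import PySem

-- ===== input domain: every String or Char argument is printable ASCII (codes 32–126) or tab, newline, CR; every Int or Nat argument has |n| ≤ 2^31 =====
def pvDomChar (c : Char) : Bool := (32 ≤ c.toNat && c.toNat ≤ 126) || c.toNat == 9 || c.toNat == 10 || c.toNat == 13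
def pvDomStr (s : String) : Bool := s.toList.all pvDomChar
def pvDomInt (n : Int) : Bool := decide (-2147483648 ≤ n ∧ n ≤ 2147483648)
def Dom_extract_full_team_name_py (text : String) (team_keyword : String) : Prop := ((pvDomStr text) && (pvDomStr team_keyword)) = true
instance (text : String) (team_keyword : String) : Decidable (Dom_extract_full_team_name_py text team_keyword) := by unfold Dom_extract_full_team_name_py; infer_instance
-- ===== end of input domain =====

-- B rebuilds the name from three takeWhile-extracted pieces instead of A's index-decrementing/incrementing
-- while loops plus one slice (objective: alternative decomposition; same cost).

-- ===== PORT A =====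
-- 'while start > 0 and text[start - 1].isalnum(): start -= 1'
def pvExpandBack (t : List Char) : Nat → Nat
  | 0 => 0
  | s + 1 => if PySem.Chars.isalnum (t.getD s ' ') then pvExpandBack t s else s + 1

-- 'while end < len(text) and (text[end].isalnum() or text[end] in " -"): end += 1'
def pvExpandFwd (t : List Char) (e : Nat) : Nat :=
  if h : e < t.length then
    if PySem.Chars.isalnum t[e] || t[e] == ' ' || t[e] == '-' then pvExpandFwd t (e + 1) else e
  else e
termination_by t.length - e

def extract_full_team_name_py (text : String) (team_keyword : String) : Option String :=
  let t := text.toList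
  let kw := team_keyword.toList
  let keyword_pos := PySem.Chars.find (PySem.Chars.lower t) kw
  if keyword_pos = -1 then none
  else
    let start := pvExpandBack t keyword_pos.toNat
    let stop := pvExpandFwd t (keyword_pos.toNat + kw.length)
    let full_name := PySem.Chars.strip (PySem.List.slice t (some (start : Int)) (some (stop : Int)))
    if full_name = [] then none else some (String.ofList full_name)

-- ===== PORT B =====
-- Source B's hand-written _take_while loop
def pvTakeWhile (p : Char → Bool) : List Char → List Char
  | [] => []
  | c :: cs => if p c then c :: pvTakeWhile p cs else []

def extract_full_team_name_py_alt (text : String) (team_keyword : String) : Option String :=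
  let t := text.toList
  let kw := team_keyword.toList
  let pos := PySem.Chars.find (PySem.Chars.lower t) kw
  if pos = -1 then none
  else
    let p := pos.toNat
    let e := p + kw.length
    let back := pvTakeWhile PySem.Chars.isalnum (PySem.List.slice t none (some (p : Int))).reverse
    let fwd := pvTakeWhile (fun c => PySem.Chars.isalnum c || c == ' ' || c == '-')
        (PySem.List.slice t (some (e : Int)) none)
    let full := PySem.Chars.strip
        (back.reverse ++ PySem.List.slice t (some (p : Int)) (some (e : Int)) ++ fwd)
    if full = [] then none else some (String.ofList full)

-- ===== PRECONDITION & SPEC =====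
def Spec_extract_full_team_name_py (text : String) (team_keyword : String) (out : Option String) : Prop := out = extract_full_team_name_py_alt text team_keyword
instance (text : String) (team_keyword : String) (out : Option String) : Decidable (Spec_extract_full_team_name_py text team_keyword out) := by unfold Spec_extract_full_team_name_py; infer_instance

-- ===== CLAIM (what is proved, stated in full; the proofs are below) =====
def Claim_equal_extract_full_team_name_py : Prop := ∀ (text : String) (team_keyword : String), Dom_extract_full_team_name_py text team_keyword → Spec_extract_full_team_name_py text team_keyword (extract_full_team_name_py text team_keyword)

-- ===== LEMMAS AND PROOFS =====

-- backward while loop = takeWhile on the reversed prefix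
lemma pvExpandBack_spec (t : List Char) : ∀ p, p ≤ t.length →
    pvExpandBack t p ≤ p ∧
    (pvTakeWhile PySem.Chars.isalnum (t.take p).reverse).reverse
      = (t.take p).drop (pvExpandBack t p) := by
  intro p
  induction p with
  | zero => intro _; simp [pvExpandBack, pvTakeWhile]
  | succ p ih =>
    intro hp
    have hlt : p < t.length := by omega
    obtain ⟨ihle, iheq⟩ := ih (by omega)
    have hget : t.getD p ' ' = t[p] := by
      simp [List.getD_eq_getElem?_getD, hlt]
    have htake : t.take (p+1) = t.take p ++ [t[p]] := List.take_succ_eq_append_getElem hlt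
    have hB : pvExpandBack t (p+1) = if PySem.Chars.isalnum t[p] then pvExpandBack t p else p + 1 := by
      rw [pvExpandBack, hget]
    by_cases hc : PySem.Chars.isalnum t[p] = true
    · constructor
      · rw [hB, if_pos hc]; omega
      · rw [hB, if_pos hc, htake]
        rw [List.reverse_append, List.reverse_singleton]
        simp only [List.singleton_append, pvTakeWhile, hc, if_pos]
        rw [List.reverse_cons, iheq,
          List.drop_append_of_le_length (by simp [List.length_take]; omega)]
    · constructor
      · rw [hB, if_neg hc]
      · rw [hB, if_neg hc, htake]
        rw [List.reverse_append, List.reverse_singleton]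
        simp only [List.singleton_append, pvTakeWhile, hc]
        simp [List.drop_eq_nil_of_le, List.length_take]

-- forward while loop = takeWhile on the suffix
lemma pvExpandFwd_spec (t : List Char) : ∀ n e, t.length - e ≤ n → e ≤ t.length →
    e ≤ pvExpandFwd t e ∧ pvExpandFwd t e ≤ t.length ∧
    pvTakeWhile (fun c => PySem.Chars.isalnum c || c == ' ' || c == '-') (t.drop e)
      = (t.take (pvExpandFwd t e)).drop e := by
  intro n
  induction n with
  | zero =>
    intro e hn he
    have heq : e = t.length := by omega
    rw [pvExpandFwd, dif_neg (by omega)]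
    subst heq
    simp [pvTakeWhile, List.drop_eq_nil_of_le]
  | succ n ih =>
    intro e hn he
    by_cases h : e < t.length
    · have hdrop : t.drop e = t[e] :: t.drop (e+1) := List.drop_eq_getElem_cons h
      by_cases hc : (PySem.Chars.isalnum t[e] || t[e] == ' ' || t[e] == '-') = true
      · obtain ⟨ih1, ih2, ih3⟩ := ih (e+1) (by omega) (by omega)
        have hE : pvExpandFwd t e = pvExpandFwd t (e+1) := by
          rw [pvExpandFwd, dif_pos h, if_pos hc]
        refine ⟨by omega, by omega, ?_⟩
        rw [hE, hdrop]
        simp only [pvTakeWhile, hc, if_pos]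
        rw [ih3]
        have he' : e < (t.take (pvExpandFwd t (e+1))).length := by
          simp [List.length_take]; omega
        rw [List.drop_eq_getElem_cons he', List.getElem_take]
      · have hE : pvExpandFwd t e = e := by
          rw [pvExpandFwd, dif_pos h, if_neg hc]
        refine ⟨by omega, by omega, ?_⟩
        rw [hE, hdrop]
        simp only [pvTakeWhile, hc]
        simp [List.drop_eq_nil_of_le, List.length_take]
    · rw [pvExpandFwd, dif_neg h]
      have heq : e = t.length := by omega
      subst heq
      simp [pvTakeWhile, List.drop_eq_nil_of_le]

-- splitting a segment of t at an interior point
lemma pvSegSplit (t : List Char) (a b c : Nat) (hab : a ≤ b) (hbc : b ≤ c) (hc : c ≤ t.length) :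
    (t.take c).drop a = (t.take b).drop a ++ (t.take c).drop b := by
  have h1 : (t.take c).take b = t.take b := by
    rw [List.take_take]; congr 1; omega
  calc (t.take c).drop a = ((t.take c).take b ++ (t.take c).drop b).drop a := by
        rw [List.take_append_drop]
    _ = ((t.take c).take b).drop a ++ (t.take c).drop b := by
        apply List.drop_append_of_le_length
        simp [List.length_take]; omega
    _ = (t.take b).drop a ++ (t.take c).drop b := by rw [h1]

theorem extract_full_team_name_py_spec_aux (text team_keyword : String) :
    extract_full_team_name_py text team_keyword = extract_full_team_name_py_alt text team_keyword := by
  simp only [extract_full_team_name_py, extract_full_team_name_py_alt]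
  set t := text.toList with ht
  set kw := team_keyword.toList with hkw
  set pos := PySem.Chars.find (PySem.Chars.lower t) kw with hpos
  by_cases hfind : pos = -1
  · simp [hfind]
  · rw [if_neg hfind, if_neg hfind]
    have h0 : (0 : Int) ≤ pos := by
      have := PySem.Chars.neg_one_le_find (PySem.Chars.lower t) kw
      rw [← hpos] at this; omega
    have hlow : (PySem.Chars.lower t).length = t.length := by simp [PySem.Chars.lower]
    have hple : pos ≤ (t.length : Int) := by
      have := PySem.Chars.find_le_length (PySem.Chars.lower t) kw
      rw [← hpos, hlow] at this; exact_mod_cast this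
    set p := pos.toNat with hp
    have hpl : p ≤ t.length := by omega
    have hpre : kw <+: (PySem.Chars.lower t).drop p :=
      (PySem.Chars.find_spec (by rw [← hpos]; omega : (0:Int) ≤ PySem.Chars.find (PySem.Chars.lower t) kw)).1
    have hkwlen : p + kw.length ≤ t.length := by
      have := hpre.length_le
      simp [hlow] at this
      omega
    set e := p + kw.length with he
    obtain ⟨hs1, hs2⟩ := pvExpandBack_spec t p hpl
    obtain ⟨hf1, hf2, hf3⟩ := pvExpandFwd_spec t (t.length - e) e (by omega) (by omega)
    set s := pvExpandBack t p with hs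
    set E := pvExpandFwd t e with hE
    -- rewrite all three slices as drop/take segments
    simp only [PySem.List.slice_natCast, PySem.List.slice_to_natCast, PySem.List.slice_from_natCast]
    have hseg : (t.drop s).take (E - s) = (t.take E).drop s := by
      rw [List.drop_take]
    have hmid : (t.drop p).take (e - p) = (t.take e).drop p := by
      rw [List.drop_take]
    have hsplit : (t.take E).drop s = (t.take p).drop s ++ ((t.take e).drop p ++ (t.take E).drop e) := by
      rw [← List.append_assoc, ← pvSegSplit t s p e hs1 (by omega) (by omega),
        ← pvSegSplit t s e E (by omega) hf1 hf2]
    rw [hseg, hsplit, ← hs2, ← hf3, ← hmid, ← List.append_assoc]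

-- ===== VERDICT (by name: the statement is the Claim_ definition above) =====
theorem extract_full_team_name_py_spec : Claim_equal_extract_full_team_name_py := by
  intro text team_keyword _
  unfold Spec_extract_full_team_name_py
  exact extract_full_team_name_py_spec_aux text team_keyword
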